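-- pv_equiv track=rewrite | github.com/olaxbt/ai-market-maker | src/api/wallet_auth.py | parse_challenge
-- ===== SOURCE A (Python) =====
-- def parse_challenge(challenge: str) -> dict | None:
--     """Parse a challenge message back into its components."""
--     lines = challenge.strip().split("\n")
--     wallet = None
--     nonce = None
--     for line in lines:
--         if line.startswith("Wallet: "):
--             wallet = line[8:].strip()
--         if line.startswith("Nonce: "):
--             nonce = line[7:].strip()
--     if wallet:
--         return {"wallet": wallet, "nonce": nonce}
--     return None
-- ===== SOURCE B (Python) =====
-- def parse_challenge(challenge: str) -> dict | None:
--     """Parse a challenge message back into its components."""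
--     fields = {}
--     for line in challenge.strip().split("\n"):
--         if ": " in line:
--             key, _, value = line.partition(": ")
--             fields[key] = value.strip()
--     wallet = fields.get("Wallet")
--     if wallet:
--         return {"wallet": wallet, "nonce": fields.get("Nonce")}
--     return None
-- ===== Notes on version B (the rewrite author's own statement) =====
-- stated objective: alternative
-- what changed: A's two prefix-specific startswith branches are replaced by a generic single-pass field table: every line holding a key-value separator is partitioned at its first separator into key and value and stored in a dict (overwrite gives last-wins), then the wallet and nonce fields are looked up.
import Mathlib
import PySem

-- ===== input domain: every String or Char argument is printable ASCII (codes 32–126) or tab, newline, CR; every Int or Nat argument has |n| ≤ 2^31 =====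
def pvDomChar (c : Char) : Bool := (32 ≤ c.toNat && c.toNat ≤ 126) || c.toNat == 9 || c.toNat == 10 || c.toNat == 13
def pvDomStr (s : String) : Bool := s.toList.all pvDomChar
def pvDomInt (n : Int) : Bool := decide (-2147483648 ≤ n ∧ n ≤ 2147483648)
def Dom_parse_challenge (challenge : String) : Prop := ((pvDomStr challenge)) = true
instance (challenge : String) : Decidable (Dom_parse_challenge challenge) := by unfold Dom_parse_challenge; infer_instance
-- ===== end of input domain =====

-- B replaces A's two prefix-specific startswith branches by one generic key/value pass
-- (partition each line at its first ': ' into a dict, overwrite = last wins) plus two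
-- lookups — objective: a different decomposition of the same parse, not speed.

-- ===== PORT A =====
-- A's loop body, one step per line: the two startswith branches in A's order;
-- line[8:] / line[7:] are the slices past the matched prefixes.
def pvAStep (st : Option (List Char) × Option (List Char)) (line : List Char) :
    Option (List Char) × Option (List Char) :=
  let st1 := if PySem.Chars.startswith line "Wallet: ".toList then
      (some (PySem.Chars.strip (PySem.Chars.slice line (some 8) none)), st.2) else st
  if PySem.Chars.startswith line "Nonce: ".toList then
      (st1.1, some (PySem.Chars.strip (PySem.Chars.slice line (some 7) none))) else st1

def parse_challenge (challenge : String) : Option (List (String × Option String)) :=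
  let lines := PySem.Chars.splitOn (PySem.Chars.strip challenge.toList) "\n".toList
  let st := lines.foldl pvAStep (none, none)
  -- 'if wallet:' — truthy iff wallet is a non-empty string
  match st.1 with
  | some w =>
      if w = [] then none
      else some [("wallet", some (String.ofList w)), ("nonce", st.2.map String.ofList)]
  | none => none

-- ===== PORT B =====
-- line.partition(sep), ported by hand for the only case B uses it ('sep in line'):
-- split at the first occurrence of sep, located by find — exact there (Chars.find_spec).
def pvPartition1 (line sep : List Char) : List Char × List Char :=
  let i := (PySem.Chars.find line sep).toNat
  (line.take i, line.drop (i + sep.length))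

-- B's loop body: store every 'key: value' field in the dict, overwrite = last wins.
def pvBStep (d : PySem.Dict (List Char) (List Char)) (line : List Char) :
    PySem.Dict (List Char) (List Char) :=
  if PySem.Chars.isIn ": ".toList line then
    let kv := pvPartition1 line ": ".toList
    d.insert kv.1 (PySem.Chars.strip kv.2)
  else d

def parse_challenge_alt (challenge : String) : Option (List (String × Option String)) :=
  let fields := (PySem.Chars.splitOn (PySem.Chars.strip challenge.toList) "\n".toList).foldl
      pvBStep PySem.Dict.empty
  match fields.get? "Wallet".toList with
  | some w =>
      if w = [] then none
      else some [("wallet", some (String.ofList w)),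
                 ("nonce", (fields.get? "Nonce".toList).map String.ofList)]
  | none => none

-- ===== PRECONDITION & SPEC =====
def Spec_parse_challenge (challenge : String) (out : Option (List (String × Option String))) : Prop := out = parse_challenge_alt challenge
instance (challenge : String) (out : Option (List (String × Option String))) : Decidable (Spec_parse_challenge challenge out) := by unfold Spec_parse_challenge; infer_instance

-- ===== CLAIM (what is proved, stated in full; the proofs are below) =====
def Claim_equal_parse_challenge : Prop := ∀ (challenge : String), Dom_parse_challenge challenge → Spec_parse_challenge challenge (parse_challenge challenge)

-- ===== LEMMAS AND PROOFS =====

-- The first ': ' of a 'Wallet: …' line is the one after 'Wallet' ('Wallet' has no ':').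
lemma pv_find_W (rest : List Char) :
    PySem.Chars.find ('W'::'a'::'l'::'l'::'e'::'t'::':'::' '::rest) [':',' '] = 6 := by
  simp [PySem.Chars.find, PySem.Chars.find.go, List.isPrefixOf]

lemma pv_find_N (rest : List Char) :
    PySem.Chars.find ('N'::'o'::'n'::'c'::'e'::':'::' '::rest) [':',' '] = 5 := by
  simp [PySem.Chars.find, PySem.Chars.find.go, List.isPrefixOf]

-- If B's partition key of a line is k, then the line starts with 'k: '.
lemma pv_key_prefix (line k : List Char)
    (hIn : PySem.Chars.isIn ": ".toList line = true)
    (hk : line.take (PySem.Chars.find line ": ".toList).toNat = k) :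
    PySem.Chars.startswith line (k ++ ": ".toList) = true := by
  have hpos : 0 ≤ PySem.Chars.find line ": ".toList :=
    (PySem.Chars.find_nonneg_iff _ _).2 ((PySem.Chars.isIn_iff_infix _ _).1 hIn)
  obtain ⟨hpre, -⟩ := PySem.Chars.find_spec hpos
  obtain ⟨t, ht⟩ := hpre
  rw [PySem.Chars.startswith_iff]
  exact ⟨t, by rw [← hk, List.append_assoc, ht, List.take_append_drop]⟩

-- One step preserves the invariant "dict lookups of 'Wallet'/'Nonce' = A's pair".
lemma pv_step_invariant (line : List Char) (d : PySem.Dict (List Char) (List Char))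
    (st : Option (List Char) × Option (List Char))
    (hw : d.get? "Wallet".toList = st.1) (hn : d.get? "Nonce".toList = st.2) :
    (pvBStep d line).get? "Wallet".toList = (pvAStep st line).1 ∧
    (pvBStep d line).get? "Nonce".toList = (pvAStep st line).2 := by
  by_cases hW : PySem.Chars.startswith line "Wallet: ".toList = true
  · obtain ⟨rest, rfl⟩ := (PySem.Chars.startswith_iff _ _).1 hW
    refine ⟨?_, ?_⟩ <;>
      · simp [pvBStep, pvAStep, pvPartition1, PySem.Chars.isIn, pv_find_W,
          PySem.Chars.startswith, List.isPrefixOf,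
          PySem.Dict.get?_insert_self, PySem.Dict.get?_insert_of_ne,
          PySem.Chars.slice_eq_listSlice, PySem.List.slice_from]
        try exact hn
  · by_cases hN : PySem.Chars.startswith line "Nonce: ".toList = true
    · obtain ⟨rest, rfl⟩ := (PySem.Chars.startswith_iff _ _).1 hN
      refine ⟨?_, ?_⟩ <;>
        · simp [pvBStep, pvAStep, pvPartition1, PySem.Chars.isIn, pv_find_N,
            PySem.Chars.startswith, List.isPrefixOf,
            PySem.Dict.get?_insert_self, PySem.Dict.get?_insert_of_ne,
            PySem.Chars.slice_eq_listSlice, PySem.List.slice_from]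
          try exact hw
    · by_cases hIn : PySem.Chars.isIn ": ".toList line = true
      · have hkW : line.take (PySem.Chars.find line ": ".toList).toNat ≠ "Wallet".toList :=
          fun hk => hW (pv_key_prefix line _ hIn hk)
        have hkN : line.take (PySem.Chars.find line ": ".toList).toNat ≠ "Nonce".toList :=
          fun hk => hN (pv_key_prefix line _ hIn hk)
        rw [Bool.not_eq_true] at hW hN
        unfold pvBStep pvAStep pvPartition1
        rw [if_pos hIn, hW, hN]
        simp only [Bool.false_eq_true, if_false]
        constructor
        · rw [PySem.Dict.get?_insert_of_ne _ _ (Ne.symm hkW), hw]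
        · rw [PySem.Dict.get?_insert_of_ne _ _ (Ne.symm hkN), hn]
      · rw [Bool.not_eq_true] at hW hN hIn
        unfold pvBStep pvAStep
        rw [if_neg (by rw [hIn]; exact Bool.false_ne_true), hW, hN]
        simp only [Bool.false_eq_true, if_false]
        exact ⟨hw, hn⟩

lemma pv_loop_invariant (lines : List (List Char)) (d : PySem.Dict (List Char) (List Char))
    (st : Option (List Char) × Option (List Char))
    (hw : d.get? "Wallet".toList = st.1) (hn : d.get? "Nonce".toList = st.2) :
    (lines.foldl pvBStep d).get? "Wallet".toList = (lines.foldl pvAStep st).1 ∧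
    (lines.foldl pvBStep d).get? "Nonce".toList = (lines.foldl pvAStep st).2 := by
  induction lines generalizing d st with
  | nil => exact ⟨hw, hn⟩
  | cons line rest ih =>
      obtain ⟨h1, h2⟩ := pv_step_invariant line d st hw hn
      exact ih _ _ h1 h2

-- ===== VERDICT (by name: the statement is the Claim_ definition above) =====
theorem parse_challenge_spec : Claim_equal_parse_challenge := by
  intro challenge _
  unfold Spec_parse_challenge parse_challenge parse_challenge_alt
  obtain ⟨h1, h2⟩ := pv_loop_invariant
    (PySem.Chars.splitOn (PySem.Chars.strip challenge.toList) "\n".toList)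
    PySem.Dict.empty (none, none) rfl rfl
  simp only [h1, h2]
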